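-- pv_equiv track=rewrite | github.com/cngai/CS131 | Project/server.py | convert_lat_long
-- ===== SOURCE A (Python) =====
-- def convert_lat_long(lat_long):
-- 	latitude = ""
-- 	longitude = ""
-- 	done_with_lat = 1 # 0 for false, 1 for true; starts at 1 b/c immediately should switch to 0
--
-- 	# iterate through each char in lat_long
-- 	for i in lat_long:
-- 		if i == '+' or i == '-':
-- 			# switch
-- 			if done_with_lat == 1:
-- 				done_with_lat = 0
-- 			else:
-- 				done_with_lat = 1
--
-- 		# append chars to either lat or long
-- 		if done_with_lat == 0:
-- 			latitude += i
-- 		else: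
-- 			longitude += i
--
-- 	return latitude, longitude
-- ===== SOURCE B (Python) =====
-- def convert_lat_long(lat_long):
--     # Tokenize into the prefix before the first sign plus maximal sign-led segments,
--     # then combine segments by parity: odd-indexed segments -> latitude,
--     # prefix and even-indexed (>=2) segments -> longitude.
--     segs = [[]]
--     for c in lat_long:
--         if c == '+' or c == '-':
--             segs.append([c])
--         else:
--             segs[-1].append(c)
--     latitude = ''.join(''.join(s) for s in segs[1::2])
--     longitude = ''.join(segs[0]) + ''.join(''.join(s) for s in segs[2::2])
--     return latitude, longitude
-- ===== Notes on version B (the rewrite author's own statement) =====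
-- stated objective: alternative
-- what changed: Replaces A's running toggle flag with per-char appends to two strings by a tokenize-then-combine decomposition: split the string into the prefix and maximal sign-led segments, then join segments by parity into latitude and longitude.
import Mathlib
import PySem

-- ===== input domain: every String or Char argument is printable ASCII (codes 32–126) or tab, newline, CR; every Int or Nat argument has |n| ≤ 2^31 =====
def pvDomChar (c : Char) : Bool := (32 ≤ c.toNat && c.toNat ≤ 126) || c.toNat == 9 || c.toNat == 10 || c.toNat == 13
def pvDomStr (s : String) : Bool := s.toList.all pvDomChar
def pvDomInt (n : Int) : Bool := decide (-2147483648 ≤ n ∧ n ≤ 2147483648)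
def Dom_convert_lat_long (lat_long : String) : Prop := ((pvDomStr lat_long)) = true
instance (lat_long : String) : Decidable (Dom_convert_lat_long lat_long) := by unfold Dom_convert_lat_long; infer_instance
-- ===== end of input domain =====

-- B replaces A's running toggle flag with a tokenize-then-combine-by-parity decomposition (alternative, same cost).


-- ===== PORT A =====
-- A's loop: toggle flag done_with_lat (Int 0/1), append each char to latitude or longitude.
-- Python string concatenation is ported as List Char accumulation, re-packed with String.mk at the end.
def convertLoopA : List Char → List Char × List Char × Int → List Char × List Char × Int
  | [], st => st
  | i :: rest, (lat, lon, flag) =>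
    let flag' := if i = '+' ∨ i = '-' then (if flag = 1 then (0 : Int) else 1) else flag
    if flag' = 0 then convertLoopA rest (lat ++ [i], lon, flag')
    else convertLoopA rest (lat, lon ++ [i], flag')

def convert_lat_long (lat_long : String) : String × String :=
  let st := convertLoopA lat_long.toList ([], [], 1)
  (String.mk st.1, String.mk st.2.1)

-- ===== PORT B =====
-- segsAuxB builds Source B's `segs`: the prefix segment followed by the maximal sign-led segments.
def segsAuxB : List Char → List Char → List (List Char)
  | [], cur => [cur]
  | c :: rest, cur =>
    if c = '+' ∨ c = '-' then cur :: segsAuxB rest [c]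
    else segsAuxB rest (cur ++ [c])

-- everyOtherB xs is xs[0::2]; applied after `drop` it ports Source B's segs[1::2] / segs[2::2] exactly.
def everyOtherB : List (List Char) → List (List Char)
  | [] => []
  | [x] => [x]
  | x :: _ :: xs => x :: everyOtherB xs

def convert_lat_long_alt (lat_long : String) : String × String :=
  let segs := segsAuxB lat_long.toList []
  let lat := (everyOtherB (segs.drop 1)).flatten
  let lon := segs.headI ++ (everyOtherB (segs.drop 2)).flatten
  (String.mk lat, String.mk lon)

-- ===== PRECONDITION & SPEC =====
def Spec_convert_lat_long (lat_long : String) (out : String × String) : Prop := out = convert_lat_long_alt lat_long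
instance (lat_long : String) (out : String × String) : Decidable (Spec_convert_lat_long lat_long out) := by unfold Spec_convert_lat_long; infer_instance

-- ===== CLAIM (what is proved, stated in full; the proofs are below) =====
def Claim_equal_convert_lat_long : Prop := ∀ (lat_long : String), Dom_convert_lat_long lat_long → Spec_convert_lat_long lat_long (convert_lat_long lat_long)

-- ===== LEMMAS AND PROOFS =====

theorem eoB_cons (x : List Char) (xs : List (List Char)) :
    everyOtherB (x :: xs) = x :: everyOtherB (xs.drop 1) := by
  cases xs <;> simp [everyOtherB]

-- segsAuxB with an arbitrary accumulator: the accumulator is prepended to the head segment.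
theorem segsAuxB_acc (rest : List Char) : ∀ cur : List Char,
    segsAuxB rest cur = (cur ++ (segsAuxB rest []).headI) :: (segsAuxB rest []).tail := by
  induction rest with
  | nil => intro cur; simp [segsAuxB]
  | cons c rs ih =>
    intro cur
    by_cases h : c = '+' ∨ c = '-'
    · simp [segsAuxB, h]
    · simp only [segsAuxB, if_neg h, List.nil_append]
      rw [ih (cur ++ [c]), ih [c]]
      simp

-- Loop invariant: from flag 1 (resp. 0) A's loop appends the parity-combined segments of the
-- remaining input to longitude (resp. latitude) exactly as B's decomposition prescribes.
theorem convertLoopA_inv (rest : List Char) : ∀ lat lon : List Char,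
    ((convertLoopA rest (lat, lon, 1)).1
        = lat ++ (everyOtherB ((segsAuxB rest []).tail)).flatten ∧
     (convertLoopA rest (lat, lon, 1)).2.1
        = lon ++ (segsAuxB rest []).headI ++ (everyOtherB (((segsAuxB rest []).tail).drop 1)).flatten) ∧
    ((convertLoopA rest (lat, lon, 0)).1
        = lat ++ (segsAuxB rest []).headI ++ (everyOtherB (((segsAuxB rest []).tail).drop 1)).flatten ∧
     (convertLoopA rest (lat, lon, 0)).2.1
        = lon ++ (everyOtherB ((segsAuxB rest []).tail)).flatten) := by
  induction rest with
  | nil => intro lat lon; simp [convertLoopA, segsAuxB, everyOtherB]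
  | cons c rs ih =>
    intro lat lon
    by_cases h : c = '+' ∨ c = '-'
    · have hsegs : segsAuxB (c :: rs) [] = [] :: ([c] ++ (segsAuxB rs []).headI) :: (segsAuxB rs []).tail := by
        simp [segsAuxB, h, segsAuxB_acc rs [c]]
      refine ⟨⟨?_, ?_⟩, ?_, ?_⟩
      · simp [convertLoopA, h, hsegs, eoB_cons, ((ih (lat ++ [c]) lon).2).1]
      · simp [convertLoopA, h, hsegs, ((ih (lat ++ [c]) lon).2).2]
      · simp [convertLoopA, h, hsegs, ((ih lat (lon ++ [c])).1).1]
      · simp [convertLoopA, h, hsegs, eoB_cons, ((ih lat (lon ++ [c])).1).2]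
    · have hsegs : segsAuxB (c :: rs) [] = ([c] ++ (segsAuxB rs []).headI) :: (segsAuxB rs []).tail := by
        simp only [segsAuxB, if_neg h, List.nil_append]
        rw [segsAuxB_acc rs [c]]
      refine ⟨⟨?_, ?_⟩, ?_, ?_⟩
      · simp [convertLoopA, h, hsegs, ((ih lat (lon ++ [c])).1).1]
      · simp [convertLoopA, h, hsegs, ((ih lat (lon ++ [c])).1).2]
      · simp [convertLoopA, h, hsegs, ((ih (lat ++ [c]) lon).2).1]
      · simp [convertLoopA, h, hsegs, ((ih (lat ++ [c]) lon).2).2]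

-- ===== VERDICT (by name: the statement is the Claim_ definition above) =====
theorem convert_lat_long_spec : Claim_equal_convert_lat_long := by
  intro s _
  unfold Spec_convert_lat_long convert_lat_long convert_lat_long_alt
  have h := (convertLoopA_inv s.toList [] []).1
  have h2 : (segsAuxB s.toList []).drop 2 = ((segsAuxB s.toList []).tail).drop 1 := by
    cases segsAuxB s.toList [] <;> simp
  simp only [List.drop_one, h2, h.1, h.2, List.nil_append]
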